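-- pv_equiv track=rewrite | github.com/rrpinho/EstudosPython | Utilitário/receberArduino.py | limparRecebido
-- ===== SOURCE A (Python) =====
-- def limparRecebido(arduino):
--     controle = False
--     limpo = ''
--     for letra in arduino:
--         if letra == '\\':
--             controle = False
--
--         if controle:
--             limpo += letra
--
--         if letra == '\'':
--             controle = True
--     return limpo
-- ===== SOURCE B (Python) =====
-- def limparRecebido(arduino):
--     # Marker-jumping loop: cut the string at the next opening quote, copy up to
--     # the next backslash, continue on the remainder (vs. A's per-char boolean flag).
--     parts = []
--     s = arduino
--     while True:
--         i = s.find("'")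
--         if i < 0:
--             return ''.join(parts)
--         rest = s[i + 1:]
--         j = rest.find('\\')
--         if j < 0:
--             parts.append(rest)
--             return ''.join(parts)
--         parts.append(rest[:j])
--         s = rest[j + 1:]
-- ===== Notes on version B (the rewrite author's own statement) =====
-- stated objective: faster
-- what changed: Replaces A's per-character boolean state machine with a marker-jumping loop that uses str.find to cut the string at each opening quote, copies the region up to the next backslash, and joins the collected parts at the end.
import Mathlib
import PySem

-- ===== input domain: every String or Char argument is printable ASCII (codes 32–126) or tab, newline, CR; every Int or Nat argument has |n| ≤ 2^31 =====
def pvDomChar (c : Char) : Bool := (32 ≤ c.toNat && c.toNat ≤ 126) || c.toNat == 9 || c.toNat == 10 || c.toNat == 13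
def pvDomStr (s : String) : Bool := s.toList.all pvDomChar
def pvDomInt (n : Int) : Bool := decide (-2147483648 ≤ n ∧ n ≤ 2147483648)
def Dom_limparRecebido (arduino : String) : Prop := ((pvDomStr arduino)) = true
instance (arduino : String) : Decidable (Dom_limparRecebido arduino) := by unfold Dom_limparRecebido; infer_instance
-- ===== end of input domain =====

-- B replaces A's per-character boolean state machine by a marker-jumping recursion
-- (find the next quote, copy up to the next backslash, continue); measured faster on the
-- timing run's random inputs (C-level find/slice and one join vs a per-char loop).

-- ===== PORT A =====
-- A's loop body over the characters, state (controle, limpo); limpo built as a char list.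
def pvStepA (st : Bool × List Char) (letra : Char) : Bool × List Char :=
  let controle := if letra = '\\' then false else st.1
  let limpo := if controle then st.2 ++ [letra] else st.2
  (if letra = '\'' then true else controle, limpo)

def limparRecebido (arduino : String) : String :=
  String.mk (arduino.toList.foldl pvStepA (false, [])).2

-- ===== PORT B =====
-- two length lemmas about python slicing, used only for B's termination
theorem pvSliceLenLe (xs : List Char) (a : Int) :
    (PySem.Chars.slice xs (some a) none).length ≤ xs.length := by
  simp only [PySem.Chars.slice_eq_listSlice, PySem.List.slice_some_none, List.length_drop]
  omega

theorem pvSliceLenLt (xs : List Char) (a : Int) (h1 : 1 ≤ a) (h0 : 0 < xs.length) :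
    (PySem.Chars.slice xs (some a) none).length < xs.length := by
  rw [PySem.Chars.slice_eq_listSlice, PySem.List.slice_from xs (by omega), List.length_drop]
  omega

-- B's while loop over (s, parts); python's parts.append is a cons onto the
-- accumulator (joined in order at the end); rest[:j] / rest[j+1:] are PySem.Chars.slice.
def limparRecebidoAltGo (cs : List Char) (parts : List (List Char)) : List Char :=
  let i := PySem.Chars.find cs ['\'']
  if h : i < 0 then parts.reverse.flatten
  else
    let rest := PySem.Chars.slice cs (some (i + 1)) none
    let j := PySem.Chars.find rest ['\\']
    if hj : j < 0 then ((rest :: parts).reverse).flatten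
    else limparRecebidoAltGo (PySem.Chars.slice rest (some (j + 1)) none)
           (PySem.Chars.slice rest none (some j) :: parts)
termination_by cs.length
decreasing_by
  have hi : 0 ≤ PySem.Chars.find cs ['\''] := not_lt.mp h
  have hpos : 0 < cs.length := by
    rcases cs with _ | ⟨c, cs⟩
    · exact absurd hi (by decide)
    · simp
  exact lt_of_le_of_lt (pvSliceLenLe _ _) (pvSliceLenLt _ _ (by omega) hpos)

def limparRecebido_alt (arduino : String) : String :=
  String.mk (limparRecebidoAltGo arduino.toList [])

-- ===== PRECONDITION & SPEC =====
def Spec_limparRecebido (arduino : String) (out : String) : Prop := out = limparRecebido_alt arduino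
instance (arduino : String) (out : String) : Decidable (Spec_limparRecebido arduino out) := by unfold Spec_limparRecebido; infer_instance

-- ===== CLAIM (what is proved, stated in full; the proofs are below) =====
def Claim_equal_limparRecebido : Prop := ∀ (arduino : String), Dom_limparRecebido arduino → Spec_limparRecebido arduino (limparRecebido arduino)

-- ===== LEMMAS AND PROOFS =====

-- The characters A emits from state ctrl, as a direct recursion.
def pvEmit (ctrl : Bool) : List Char → List Char
  | [] => []
  | c :: cs =>
      let c1 := if c = '\\' then false else ctrl
      (if c1 then [c] else []) ++ pvEmit (if c = '\'' then true else c1) cs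

-- B's two modes as plain structural recursions.
mutual
def pvOut : List Char → List Char
  | [] => []
  | c :: cs => if c = '\'' then pvIns cs else pvOut cs
def pvIns : List Char → List Char
  | [] => []
  | c :: cs => if c = '\\' then pvOut cs else c :: pvIns cs
end

theorem pvFoldA (cs : List Char) : ∀ (ctrl : Bool) (acc : List Char),
    (cs.foldl pvStepA (ctrl, acc)).2 = acc ++ pvEmit ctrl cs := by
  induction cs with
  | nil => intro ctrl acc; simp [pvEmit]
  | cons c cs ih =>
      intro ctrl acc
      simp only [List.foldl_cons, pvEmit, pvStepA, ih]
      by_cases h1 : c = '\\' <;> by_cases h2 : c = '\'' <;>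
        cases ctrl <;> simp [h1, h2]

theorem pvEmit_eq (cs : List Char) :
    ∀ ctrl, pvEmit ctrl cs = if ctrl then pvIns cs else pvOut cs := by
  induction cs with
  | nil => intro ctrl; cases ctrl <;> simp [pvEmit, pvIns, pvOut]
  | cons c cs ih =>
      intro ctrl
      by_cases h1 : c = '\\'
      · subst h1
        cases ctrl <;> simp [pvEmit, pvIns, pvOut, ih]
      · by_cases h2 : c = '\''
        · subst h2
          cases ctrl <;> simp [pvEmit, pvIns, pvOut, ih, h1]
        · cases ctrl <;> simp [pvEmit, pvIns, pvOut, ih, h1, h2]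

-- one step of CPython-style find.go for a one-character needle
theorem pvGoConsStep (c c' : Char) (cs : List Char) (k : Nat) :
    PySem.Chars.find.go [c] (c' :: cs) k
      = if c' = c then (k : Int) else PySem.Chars.find.go [c] cs (k + 1) := by
  conv_lhs => rw [PySem.Chars.find.go.eq_def]
  by_cases h : c' = c
  · subst h; simp [List.isPrefixOf]
  · have : [c].isPrefixOf (c' :: cs) = false := by
      simp [List.isPrefixOf]
      intro hc; exact absurd hc.symm h
    simp [this, h]

theorem pvGoNil (c : Char) (k : Nat) : PySem.Chars.find.go [c] [] k = -1 := by
  rw [PySem.Chars.find.go.eq_def]; simp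

theorem pvFind_nonneg {cs : List Char} {c : Char}
    (h : PySem.Chars.find cs [c] ≠ -1) : 0 ≤ PySem.Chars.find cs [c] := by
  rw [PySem.Chars.find_nonneg_iff]
  rw [PySem.Chars.find_ne_neg_one_iff] at h
  exact h

theorem pvFindGo (c : Char) (cs : List Char) : ∀ (k : Nat),
    PySem.Chars.find.go [c] cs k
      = if PySem.Chars.find cs [c] = -1 then -1
        else PySem.Chars.find cs [c] + k := by
  induction cs with
  | nil => intro k; simp [PySem.Chars.find, pvGoNil]
  | cons c' cs ih =>
      intro k
      rw [pvGoConsStep]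
      by_cases h : c' = c
      · rw [if_pos h]
        have h0 : PySem.Chars.find (c' :: cs) [c] = 0 := by
          show PySem.Chars.find.go [c] (c' :: cs) 0 = 0
          rw [pvGoConsStep, if_pos h]
          norm_num
        rw [h0]
        norm_num
      · have hstep : PySem.Chars.find (c' :: cs) [c] = PySem.Chars.find.go [c] cs 1 := by
          show PySem.Chars.find.go [c] (c' :: cs) 0 = _
          rw [pvGoConsStep, if_neg h]
        rw [if_neg h, ih (k + 1), hstep, ih 1]
        by_cases hf : PySem.Chars.find cs [c] = -1
        · simp [hf]
        · have hge := pvFind_nonneg hf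
          simp only [if_neg hf]
          split_ifs with hc
          · omega
          · push_cast
            ring

theorem pvFind_cons (c c' : Char) (cs : List Char) :
    PySem.Chars.find (c' :: cs) [c]
      = if c' = c then 0
        else if PySem.Chars.find cs [c] = -1 then -1
        else PySem.Chars.find cs [c] + 1 := by
  show PySem.Chars.find.go [c] (c' :: cs) 0 = _
  rw [pvGoConsStep]
  by_cases h : c' = c
  · simp [h]
  · rw [if_neg h, if_neg h, pvFindGo]
    norm_num

theorem pvFind_neg_eq {cs : List Char} {c : Char}
    (h : PySem.Chars.find cs [c] < 0) : PySem.Chars.find cs [c] = -1 := by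
  by_contra hne
  exact absurd (pvFind_nonneg hne) (not_le.mpr h)

-- B's out mode jumps to the character after the first quote.
theorem pvOut_find (cs : List Char) :
    pvOut cs = (if PySem.Chars.find cs ['\''] = -1 then []
                else pvIns (cs.drop ((PySem.Chars.find cs ['\'']).toNat + 1))) := by
  induction cs with
  | nil => simp [pvOut, PySem.Chars.find, pvGoNil]
  | cons c cs ih =>
      rw [pvFind_cons]
      by_cases h : c = '\''
      · subst h; simp [pvOut]
      · simp only [pvOut, if_neg h, ih]
        by_cases hf : PySem.Chars.find cs ['\''] = -1
        · simp [hf]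
        · have h0 := pvFind_nonneg hf
          simp only [if_neg hf]
          have hne1 : PySem.Chars.find cs ['\''] + 1 ≠ -1 := by omega
          simp only [if_neg hne1]
          have ht : (PySem.Chars.find cs ['\''] + 1).toNat
              = (PySem.Chars.find cs ['\'']).toNat + 1 := by omega
          rw [ht]
          rfl

-- B's ins mode copies up to the first backslash and switches back to out.
theorem pvIns_find (cs : List Char) :
    pvIns cs = (if PySem.Chars.find cs ['\\'] = -1 then cs
                else cs.take (PySem.Chars.find cs ['\\']).toNat ++
                     pvOut (cs.drop ((PySem.Chars.find cs ['\\']).toNat + 1))) := by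
  induction cs with
  | nil => simp [pvIns, PySem.Chars.find, pvGoNil]
  | cons c cs ih =>
      rw [pvFind_cons]
      by_cases h : c = '\\'
      · subst h; simp [pvIns]
      · simp only [pvIns, if_neg h, ih]
        by_cases hf : PySem.Chars.find cs ['\\'] = -1
        · simp [hf]
        · have h0 := pvFind_nonneg hf
          simp only [if_neg hf]
          have hne1 : PySem.Chars.find cs ['\\'] + 1 ≠ -1 := by omega
          simp only [if_neg hne1]
          have ht : (PySem.Chars.find cs ['\\'] + 1).toNat
              = (PySem.Chars.find cs ['\\']).toNat + 1 := by omega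
          rw [ht]
          simp [List.drop_succ_cons]

theorem pvAltGo_eq_out_aux : ∀ (n : Nat) (cs : List Char) (parts : List (List Char)),
    cs.length ≤ n →
    limparRecebidoAltGo cs parts = parts.reverse.flatten ++ pvOut cs := by
  intro n
  induction n with
  | zero =>
      intro cs parts hcs
      have hnil : cs = [] := List.eq_nil_of_length_eq_zero (Nat.le_zero.mp hcs)
      subst hnil
      have hlt : PySem.Chars.find ([] : List Char) ['\''] < 0 := by decide
      rw [limparRecebidoAltGo, dif_pos hlt]
      simp [pvOut]
  | succ n ih =>
      intro cs parts hcs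
      rw [limparRecebidoAltGo]
      by_cases h : PySem.Chars.find cs ['\''] < 0
      · rw [dif_pos h, pvOut_find, if_pos (pvFind_neg_eq h)]
        simp
      · rw [dif_neg h]
        have hi0 : 0 ≤ PySem.Chars.find cs ['\''] := not_lt.mp h
        have hine : PySem.Chars.find cs ['\''] ≠ -1 := by omega
        have hpos : 0 < cs.length := by
          rcases cs with _ | ⟨c, cs⟩
          · exact absurd hi0 (by decide)
          · simp
        have hrest : PySem.Chars.slice cs (some (PySem.Chars.find cs ['\''] + 1)) none
            = cs.drop ((PySem.Chars.find cs ['\'']).toNat + 1) := by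
          rw [PySem.Chars.slice_eq_listSlice, PySem.List.slice_from cs (by omega)]
          congr 1
          omega
        set rst := PySem.Chars.slice cs (some (PySem.Chars.find cs ['\''] + 1)) none with hr
        have hrstlen : rst.length < cs.length := by
          rw [hr]
          exact pvSliceLenLt _ _ (by omega) hpos
        by_cases hj : PySem.Chars.find rst ['\\'] < 0
        · rw [dif_pos hj, pvOut_find, if_neg hine, ← hrest,
            pvIns_find, if_pos (pvFind_neg_eq hj)]
          simp
        · rw [dif_neg hj]
          have hj0 : 0 ≤ PySem.Chars.find rst ['\\'] := not_lt.mp hj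
          have hjne : PySem.Chars.find rst ['\\'] ≠ -1 := by omega
          have h1 : PySem.Chars.slice rst none (some (PySem.Chars.find rst ['\\']))
              = rst.take (PySem.Chars.find rst ['\\']).toNat := by
            rw [PySem.Chars.slice_eq_listSlice]
            exact PySem.List.slice_to _ hj0
          have h2 : PySem.Chars.slice rst (some (PySem.Chars.find rst ['\\'] + 1)) none
              = rst.drop ((PySem.Chars.find rst ['\\']).toNat + 1) := by
            rw [PySem.Chars.slice_eq_listSlice, PySem.List.slice_from rst (by omega)]
            congr 1
            omega
          have hreclen : (rst.drop ((PySem.Chars.find rst ['\\']).toNat + 1)).length ≤ n := by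
            rw [List.length_drop]
            omega
          rw [h1, h2, ih _ _ hreclen]
          conv_rhs => rw [pvOut_find, if_neg hine, ← hrest, pvIns_find, if_neg hjne]
          simp

theorem pvAltGo_eq_out (cs : List Char) : limparRecebidoAltGo cs [] = pvOut cs := by
  have := pvAltGo_eq_out_aux cs.length cs [] le_rfl
  simpa using this

-- ===== VERDICT (by name: the statement is the Claim_ definition above) =====
theorem limparRecebido_spec : Claim_equal_limparRecebido := by
  intro arduino _
  unfold Spec_limparRecebido limparRecebido limparRecebido_alt
  rw [pvAltGo_eq_out, pvFoldA, pvEmit_eq]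
  simp
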